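-- pv_equiv track=rewrite | github.com/Mario54/comp-473 | text_features.py | _get_black_runs
-- ===== SOURCE A (Python) =====
-- def _get_black_runs(array, size_range):
--     black_runs = []
--     current_black_run_start = -1
--
--     for i, e in enumerate(array):
--         if e == 1:
--             if current_black_run_start == -1:
--                 current_black_run_start = i
--         else:
--             if current_black_run_start != -1:
--                 black_run_width = i - current_black_run_start
--
--                 if size_range[0] <= black_run_width <= size_range[1]:
--                     black_runs.append(black_run_width)
--
--                 current_black_run_start = -1
--
--     if current_black_run_start != -1:
--         black_run_width = len(array) - current_black_run_start
--         if size_range[0] <= black_run_width <= size_range[1]: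
--             black_runs.append(black_run_width)
--
--     return black_runs
-- ===== SOURCE B (Python) =====
-- def _get_black_runs(array, size_range):
--     lo, hi = size_range[0], size_range[1]
--     n = len(array)
--     # A maximal run of 1s is determined by its boundaries: a start is a 1 not
--     # preceded by a 1, an end is a 1 not followed by a 1.  Starts and ends
--     # alternate, so the k-th start pairs with the k-th end.
--     starts = [i for i in range(n) if array[i] == 1 and (i == 0 or array[i - 1] != 1)]
--     ends = [i + 1 for i in range(n) if array[i] == 1 and (i == n - 1 or array[i + 1] != 1)]
--     return [e - s for s, e in zip(starts, ends) if lo <= e - s <= hi]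
-- ===== Notes on version B (the rewrite author's own statement) =====
-- stated objective: alternative
-- what changed: Replaces A's single-pass state machine (sentinel start index, per-element branching, trailing-run epilogue) with a staged boundary computation: one comprehension collects run-start indices (a 1 not preceded by a 1), another collects run-end indices (a 1 not followed by a 1), and zipping them pairs the k-th start with the k-th end, whose difference is the run length, filtered by size_range.
import Mathlib
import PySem

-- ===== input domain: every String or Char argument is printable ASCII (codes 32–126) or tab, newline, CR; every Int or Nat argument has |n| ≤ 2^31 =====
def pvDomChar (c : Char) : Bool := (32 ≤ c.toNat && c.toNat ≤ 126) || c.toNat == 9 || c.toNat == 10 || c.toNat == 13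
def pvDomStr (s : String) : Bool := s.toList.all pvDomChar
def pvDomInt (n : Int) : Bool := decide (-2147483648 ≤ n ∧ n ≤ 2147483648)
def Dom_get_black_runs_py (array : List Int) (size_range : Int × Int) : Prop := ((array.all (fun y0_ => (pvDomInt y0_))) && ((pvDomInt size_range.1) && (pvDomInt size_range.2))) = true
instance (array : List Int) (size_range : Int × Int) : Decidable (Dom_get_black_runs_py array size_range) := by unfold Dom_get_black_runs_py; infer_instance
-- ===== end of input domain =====

-- B replaces A's one-pass state machine with a staged boundary computation:
-- collect run-start indices, collect run-end indices, zip them and filter the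
-- differences by size_range; objective: alternative. Proven equal on all inputs.

-- ===== PORT A =====
-- A's for-loop over enumerate(array) as structural recursion over the same state
-- (i, black_runs, current_black_run_start); the trailing-run epilogue is the []
-- base case, where i = len(array).
def aGo (lo hi : Int) (i : Int) (runs : List Int) (start : Int) : List Int → List Int
  | [] =>
    if start ≠ -1 then
      let w := i - start
      if lo ≤ w ∧ w ≤ hi then runs ++ [w] else runs
    else runs
  | e :: xs =>
    if e = 1 then
      if start = -1 then aGo lo hi (i + 1) runs i xs
      else aGo lo hi (i + 1) runs start xs
    else
      if start ≠ -1 then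
        let w := i - start
        aGo lo hi (i + 1) (if lo ≤ w ∧ w ≤ hi then runs ++ [w] else runs) (-1) xs
      else aGo lo hi (i + 1) runs start xs

def get_black_runs_py (array : List Int) (size_range : Int × Int) : List Int :=
  aGo size_range.1 size_range.2 0 [] (-1) array

-- ===== PORT B =====
-- B's two index comprehensions, zip, and filtered comprehension over the pairs.
-- array[i] on an index 0 ≤ i < n is ported as List.getD i 0 (always in range);
-- array[i-1] / array[i+1] are only reached under the short-circuit guards, where
-- they are in range too, so getD is exact there as well.
def get_black_runs_py_alt (array : List Int) (size_range : Int × Int) : List Int :=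
  let lo := size_range.1
  let hi := size_range.2
  let n := array.length
  let starts := (List.range n).filter
    (fun i => decide (array.getD i 0 = 1 ∧ (i = 0 ∨ array.getD (i - 1) 0 ≠ 1)))
  let ends := ((List.range n).filter
    (fun i => decide (array.getD i 0 = 1 ∧ (i = n - 1 ∨ array.getD (i + 1) 0 ≠ 1)))).map
    (fun i => (i + 1 : Nat))
  ((starts.zip ends).filter
    (fun p => decide (lo ≤ (p.2 : Int) - (p.1 : Int) ∧ (p.2 : Int) - (p.1 : Int) ≤ hi))).map
    (fun p => (p.2 : Int) - (p.1 : Int))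

-- ===== PRECONDITION & SPEC =====
def Spec_get_black_runs_py (array : List Int) (size_range : Int × Int) (out : List Int) : Prop := out = get_black_runs_py_alt array size_range
instance (array : List Int) (size_range : Int × Int) (out : List Int) : Decidable (Spec_get_black_runs_py array size_range out) := by unfold Spec_get_black_runs_py; infer_instance

-- ===== CLAIM (what is proved, stated in full; the proofs are below) =====
def Claim_equal_get_black_runs_py : Prop := ∀ (array : List Int) (size_range : Int × Int), Dom_get_black_runs_py array size_range → Spec_get_black_runs_py array size_range (get_black_runs_py array size_range)

-- ===== LEMMAS AND PROOFS =====

-- splitRun xs = (length of the maximal leading run of 1s, the rest of the list).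
def splitRun : List Int → Nat × List Int
  | [] => (0, [])
  | x :: xs => if x = 1 then let p := splitRun xs; (p.1 + 1, p.2) else (0, x :: xs)

theorem splitRun_len_le : ∀ xs : List Int, (splitRun xs).2.length ≤ xs.length
  | [] => le_refl _
  | x :: xs => by
    simp only [splitRun]
    split
    · exact le_trans (splitRun_len_le xs) (Nat.le_succ _)
    · exact le_refl _

theorem splitRun_snd_head : ∀ xs : List Int, (splitRun xs).2.headD 0 ≠ 1
  | [] => by simp [splitRun]
  | x :: xs => by
    simp only [splitRun]
    split
    · exact splitRun_snd_head xs
    · simpa using (by assumption : ¬ x = 1)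

-- The canonical list of maximal 1-run lengths, the common middle ground.
def runsOf : List Int → List Int
  | [] => []
  | x :: xs =>
    if x = 1 then (((splitRun xs).1 : Int) + 1) :: runsOf (splitRun xs).2 else runsOf xs
termination_by xs => xs.length
decreasing_by
  · exact Nat.lt_succ_of_le (splitRun_len_le xs)
  · simp

-- run-start indices (a 1 not preceded by a 1), relative, with explicit previous element
def startsList (p : Int) : List Int → List Nat
  | [] => []
  | x :: xs => (if x = 1 ∧ p ≠ 1 then [0] else []) ++ (startsList x xs).map (· + 1)

-- run-end indices + 1 (a 1 not followed by a 1)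
def endsList : List Int → List Nat
  | [] => []
  | x :: xs => (if x = 1 ∧ xs.getD 0 0 ≠ 1 then [1] else []) ++ (endsList xs).map (· + 1)

theorem map_succ_eq (l : List Nat) : List.map Nat.succ l = List.map (· + 1) l :=
  List.map_congr_left (fun a _ => rfl)

theorem starts_aux : ∀ (xs : List Int) (x : Int),
    (List.range xs.length).filter
      (fun j => decide (xs.getD j 0 = 1 ∧ (x :: xs).getD j 0 ≠ 1)) = startsList x xs := by
  intro xs
  induction xs with
  | nil => intro x; simp [startsList]
  | cons y ys ih =>
    intro x
    rw [show (y :: ys).length = ys.length + 1 from rfl, List.range_succ_eq_map,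
      List.filter_cons, List.filter_map]
    have hstep : List.filter
        ((fun j => decide ((y :: ys).getD j 0 = 1 ∧ (x :: y :: ys).getD j 0 ≠ 1)) ∘ Nat.succ)
        (List.range ys.length)
        = List.filter (fun j => decide (ys.getD j 0 = 1 ∧ (y :: ys).getD j 0 ≠ 1))
          (List.range ys.length) := by
      refine List.filter_congr (fun j hj => ?_)
      simp only [Function.comp]
      exact decide_eq_decide.mpr (by simp)
    rw [hstep, ih y]
    simp only [List.getD_cons_zero, startsList, decide_eq_true_eq, map_succ_eq]
    by_cases h : y = 1 ∧ x ≠ 1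
    · rw [if_pos h, if_pos h]; rfl
    · rw [if_neg h, if_neg h]; simp

theorem starts_eq (a : List Int) :
    (List.range a.length).filter
      (fun i => decide (a.getD i 0 = 1 ∧ (i = 0 ∨ a.getD (i - 1) 0 ≠ 1))) = startsList 0 a := by
  cases a with
  | nil => simp [startsList]
  | cons x xs =>
    rw [show (x :: xs).length = xs.length + 1 from rfl, List.range_succ_eq_map,
      List.filter_cons, List.filter_map]
    have hstep : List.filter
        ((fun i => decide ((x :: xs).getD i 0 = 1 ∧ (i = 0 ∨ (x :: xs).getD (i - 1) 0 ≠ 1))) ∘ Nat.succ)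
        (List.range xs.length)
        = List.filter (fun j => decide (xs.getD j 0 = 1 ∧ (x :: xs).getD j 0 ≠ 1))
          (List.range xs.length) := by
      refine List.filter_congr (fun j hj => ?_)
      simp only [Function.comp]
      exact decide_eq_decide.mpr (by simp)
    rw [hstep, starts_aux xs x]
    simp only [List.getD_cons_zero, startsList, decide_eq_true_eq, map_succ_eq]
    by_cases h : x = 1 <;> simp [h]

theorem ends_eq : ∀ a : List Int,
    ((List.range a.length).filter
      (fun i => decide (a.getD i 0 = 1 ∧ (i = a.length - 1 ∨ a.getD (i + 1) 0 ≠ 1)))).map (· + 1)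
      = endsList a := by
  intro a
  induction a with
  | nil => simp [endsList]
  | cons x xs ih =>
    rw [show (x :: xs).length = xs.length + 1 from rfl, List.range_succ_eq_map,
      List.filter_cons, List.filter_map]
    have hstep : List.filter
        ((fun i => decide ((x :: xs).getD i 0 = 1 ∧ (i = xs.length + 1 - 1 ∨ (x :: xs).getD (i + 1) 0 ≠ 1))) ∘ Nat.succ)
        (List.range xs.length)
        = List.filter (fun j => decide (xs.getD j 0 = 1 ∧ (j = xs.length - 1 ∨ xs.getD (j + 1) 0 ≠ 1)))
          (List.range xs.length) := by
      refine List.filter_congr (fun j hj => ?_)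
      have hlt : j < xs.length := List.mem_range.mp hj
      have hiff : (j + 1 = xs.length) ↔ (j = xs.length - 1) := by omega
      simp only [Function.comp]
      exact decide_eq_decide.mpr (by simp [Nat.succ_eq_add_one, hiff])
    rw [hstep]
    have hcond : ((x :: xs).getD 0 0 = 1 ∧ (0 = xs.length + 1 - 1 ∨ (x :: xs).getD (0 + 1) 0 ≠ 1))
        ↔ (x = 1 ∧ xs.getD 0 0 ≠ 1) := by
      cases xs with
      | nil => simp
      | cons y ys => simp
    simp only [decide_eq_true_eq, map_succ_eq, List.map_map]
    rw [if_congr hcond rfl rfl]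
    simp only [endsList, ← ih, map_succ_eq, List.map_map]
    by_cases h : x = 1 ∧ xs.getD 0 0 ≠ 1
    · rw [if_pos h, if_pos h]
      simp
    · rw [if_neg h, if_neg h]
      simp

theorem startsList_head_irrel : ∀ (l : List Int), l.headD 0 ≠ 1 → ∀ p q : Int, startsList p l = startsList q l := by
  intro l hl p q
  cases l with
  | nil => rfl
  | cons y ys =>
    have hy : ¬ y = 1 := by simpa using hl
    simp [startsList, hy]

theorem startsList_run : ∀ xs : List Int,
    startsList 1 xs = (startsList 1 (splitRun xs).2).map (· + (splitRun xs).1) := by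
  intro xs
  induction xs with
  | nil => simp [splitRun]
  | cons x xs ih =>
    by_cases hx : x = 1
    · subst hx
      simp only [startsList, splitRun, if_pos rfl]
      rw [ih]
      simp [List.map_map, Function.comp, Nat.add_assoc]
    · simp [splitRun, hx]

theorem endsList_run : ∀ xs : List Int,
    endsList (1 :: xs) = ((splitRun xs).1 + 1) :: (endsList (splitRun xs).2).map (· + ((splitRun xs).1 + 1)) := by
  intro xs
  induction xs with
  | nil => simp [endsList, splitRun]
  | cons x xs ih =>
    by_cases hx : x = 1
    · subst hx
      have h1 : endsList (1 :: 1 :: xs) = (endsList (1 :: xs)).map (· + 1) := by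
        simp [endsList]
      rw [h1, ih]
      simp [splitRun, List.map_map, Function.comp, Nat.add_assoc]
    · have h1 : endsList (1 :: x :: xs) = 1 :: (endsList (x :: xs)).map (· + 1) := by
        simp [endsList, hx]
      rw [h1]
      simp [splitRun, hx]

theorem zip_runs : ∀ (xs : List Int) (p : Int), p ≠ 1 →
    ((startsList p xs).zip (endsList xs)).map (fun q => ((q.2 : Int) - (q.1 : Int))) = runsOf xs
  | [], p, hp => by simp [startsList, endsList, runsOf]
  | x :: xs, p, hp => by
    by_cases hx : x = 1
    · subst hx
      have hs : startsList p (1 :: xs)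
          = 0 :: ((startsList 1 (splitRun xs).2).map (· + ((splitRun xs).1 + 1))) := by
        simp only [startsList]
        rw [startsList_run xs]
        simp [hp, List.map_map, Nat.add_assoc]
      have h0 : startsList 1 (splitRun xs).2 = startsList 0 (splitRun xs).2 :=
        startsList_head_irrel _ (splitRun_snd_head xs) 1 0
      rw [hs, endsList_run xs, h0]
      simp only [List.zip_cons_cons, List.zip_map, List.map_cons, List.map_map]
      have htail : ((startsList 0 (splitRun xs).2).zip (endsList (splitRun xs).2)).map
            ((fun q : Nat × Nat => ((q.2 : Int) - (q.1 : Int))) ∘ Prod.map (· + ((splitRun xs).1 + 1)) (· + ((splitRun xs).1 + 1)))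
          = ((startsList 0 (splitRun xs).2).zip (endsList (splitRun xs).2)).map
            (fun q : Nat × Nat => ((q.2 : Int) - (q.1 : Int))) := by
        refine List.map_congr_left (fun q _ => ?_)
        simp [Prod.map] <;> (push_cast; ring)
      rw [htail, zip_runs (splitRun xs).2 0 (by decide)]
      simp [runsOf]
    · have hs : startsList p (x :: xs) = (startsList x xs).map (· + 1) := by
        simp [startsList, hx]
      have he : endsList (x :: xs) = (endsList xs).map (· + 1) := by
        simp [endsList, hx]
      rw [hs, he, List.zip_map, List.map_map]
      have : ((startsList x xs).zip (endsList xs)).map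
            ((fun q : Nat × Nat => ((q.2 : Int) - (q.1 : Int))) ∘ Prod.map (· + 1) (· + 1))
          = ((startsList x xs).zip (endsList xs)).map (fun q : Nat × Nat => ((q.2 : Int) - (q.1 : Int))) := by
        refine List.map_congr_left (fun q _ => ?_)
        simp [Prod.map] <;> (push_cast; ring)
      rw [this, zip_runs xs x hx]
      simp [runsOf, hx]
termination_by xs => xs.length
decreasing_by
  all_goals simp only [List.length_cons]
  all_goals first
    | exact Nat.lt_succ_of_le (splitRun_len_le xs)
    | exact Nat.lt_succ_self _

-- Joint invariant for A's loop against the canonical run list: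
-- (1) out of a run (start = -1), aGo = runs ++ filtered runsOf;
-- (2) inside a run with start ≠ -1, aGo emits (i - start) + (remaining run length)
--     and continues with the filtered runs of the remainder.
theorem aGo_invariant (lo hi : Int) :
    ∀ xs : List Int,
      (∀ (i : Int) (runs : List Int), 0 ≤ i →
        aGo lo hi i runs (-1) xs = runs ++ (runsOf xs).filter (fun n => decide (lo ≤ n ∧ n ≤ hi))) ∧
      (∀ (i start : Int) (runs : List Int), 0 ≤ i → start ≠ -1 →
        aGo lo hi i runs start xs =
          runs ++ (let n := (i - start) + ((splitRun xs).1 : Int);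
            (if lo ≤ n ∧ n ≤ hi then [n] else []) ++
              (runsOf (splitRun xs).2).filter (fun n => decide (lo ≤ n ∧ n ≤ hi)))) := by
  intro xs
  induction xs with
  | nil =>
    constructor
    · intro i runs _
      simp [aGo, runsOf]
    · intro i start runs _ hs
      simp only [aGo, splitRun, runsOf, if_pos hs, List.filter_nil, List.append_nil,
        Nat.cast_zero, add_zero, List.nil_append]
      split <;> simp_all
  | cons x xs ih =>
    obtain ⟨ih1, ih2⟩ := ih
    constructor
    · intro i runs hi0
      by_cases hx : x = 1
      · rw [show aGo lo hi i runs (-1) (x :: xs) = aGo lo hi (i + 1) runs i xs by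
          simp [aGo, hx]]
        rw [ih2 (i + 1) i runs (by omega) (by omega)]
        simp only [runsOf, if_pos hx, List.filter_cons]
        have hn : (i + 1 - i) + ((splitRun xs).1 : Int) = ((splitRun xs).1 : Int) + 1 := by ring
        rw [hn]
        split <;> simp_all
      · rw [show aGo lo hi i runs (-1) (x :: xs) = aGo lo hi (i + 1) runs (-1) xs by
          simp [aGo, hx]]
        rw [ih1 _ _ (by omega)]
        simp [runsOf, hx]
    · intro i start runs hi0 hs
      by_cases hx : x = 1
      · rw [show aGo lo hi i runs start (x :: xs) = aGo lo hi (i + 1) runs start xs by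
          simp [aGo, hx, hs]]
        rw [ih2 (i + 1) start runs (by omega) hs]
        simp only [splitRun, if_pos hx]
        have : (i + 1 - start) + ((splitRun xs).1 : Int) =
            (i - start) + (((splitRun xs).1 + 1 : Nat) : Int) := by push_cast; ring
        rw [this]
      · rw [show aGo lo hi i runs start (x :: xs) =
            aGo lo hi (i + 1)
              (if lo ≤ i - start ∧ i - start ≤ hi then runs ++ [i - start] else runs) (-1) xs by
          simp [aGo, hx, hs]]
        rw [ih1 _ _ (by omega)]
        simp only [splitRun, if_neg hx, runsOf]
        have : (i - start) + ((0 : Nat) : Int) = i - start := by push_cast; ring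
        rw [this]
        simp [hx]
        split <;> simp

-- ===== VERDICT (by name: the statement is the Claim_ definition above) =====
theorem get_black_runs_py_spec : Claim_equal_get_black_runs_py := by
  intro array size_range _
  unfold Spec_get_black_runs_py get_black_runs_py
  rw [(aGo_invariant size_range.1 size_range.2 array).1 0 [] (le_refl 0), List.nil_append]
  simp only [get_black_runs_py_alt]
  rw [starts_eq array, ends_eq array]
  rw [show (fun p : Nat × Nat => decide (size_range.1 ≤ (p.2 : Int) - (p.1 : Int) ∧ (p.2 : Int) - (p.1 : Int) ≤ size_range.2))
      = (fun n : Int => decide (size_range.1 ≤ n ∧ n ≤ size_range.2)) ∘ (fun q : Nat × Nat => ((q.2 : Int) - (q.1 : Int))) from rfl]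
  rw [← List.filter_map]
  rw [zip_runs array 0 (by decide)]
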